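-- pv_equiv track=rewrite | github.com/qingdaoqin/daily_stock_analysis | data_provider/fundamental_adapter.py | _latest_comparable_pair
-- ===== SOURCE A (Python) =====
-- from typing import Any, Dict, List, Optional, Tuple
--
-- def _latest_comparable_pair(records: List[Dict[str, Any]]) -> Tuple[Optional[Dict[str, Any]], Optional[Dict[str, Any]]]:
--     filtered = [item for item in records if item.get("period_type") in {"annual", "quarterly"}]
--     if not filtered:
--         return None, None
--
--     latest = filtered[0]
--     target_period = latest.get("period_type")
--     for previous in filtered[1:]:
--         if previous.get("period_type") == target_period:
--             return latest, previous
--     return latest, None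
-- ===== SOURCE B (Python) =====
-- from typing import Any, Dict, List, Optional, Tuple
--
-- def _latest_comparable_pair(records: List[Dict[str, Any]]) -> Tuple[Optional[Dict[str, Any]], Optional[Dict[str, Any]]]:
--     keyed = [(item.get("period_type"), item) for item in records
--              if item.get("period_type") in ("annual", "quarterly")]
--     groups: Dict[str, list] = {}
--     for key, item in keyed:
--         groups.setdefault(key, []).append(item)
--     if not keyed:
--         return None, None
--     target, latest = keyed[0]
--     bucket = groups[target]
--     return (latest, bucket[1]) if len(bucket) >= 2 else (latest, None)
-- ===== Notes on version B (the rewrite author's own statement) =====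
-- stated objective: alternative
-- what changed: B replaces A's filter-then-forward-scan-for-a-match with a single grouping pass that builds an ordered dict of period_type buckets and answers from the first key's bucket via one lookup (latest = bucket[0], pair = bucket[1] if present).
import Mathlib
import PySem

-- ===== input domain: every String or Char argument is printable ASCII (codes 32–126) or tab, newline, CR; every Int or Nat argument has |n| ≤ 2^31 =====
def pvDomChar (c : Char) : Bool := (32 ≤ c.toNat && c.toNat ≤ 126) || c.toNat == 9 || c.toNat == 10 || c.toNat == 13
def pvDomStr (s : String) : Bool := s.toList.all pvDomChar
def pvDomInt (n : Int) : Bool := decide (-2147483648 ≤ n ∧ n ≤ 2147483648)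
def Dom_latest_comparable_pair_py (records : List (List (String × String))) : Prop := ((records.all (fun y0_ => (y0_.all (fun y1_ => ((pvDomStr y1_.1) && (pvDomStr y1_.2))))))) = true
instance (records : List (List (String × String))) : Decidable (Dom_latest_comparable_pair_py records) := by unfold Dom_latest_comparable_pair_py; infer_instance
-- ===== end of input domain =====

-- B replaces A's filter-then-forward-scan with a single grouping pass into an
-- ordered dict of period_type buckets answered by one lookup (objective: alternative).

-- ===== PORT A =====
-- item.get("period_type") : dict lookup (first match under the assoc-list convention)
def pvGetPT (item : List (String × String)) : Option String :=
  (PySem.Dict.mk item).get? "period_type"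

-- the for-loop over filtered[1:] with its early return
def pvScanA (target : Option String) : List (List (String × String)) → Option (List (String × String))
  | [] => none
  | previous :: rest =>
      if pvGetPT previous == target then some previous else pvScanA target rest

def latest_comparable_pair_py (records : List (List (String × String))) : (Option (List (String × String))) × (Option (List (String × String))) :=
  let filtered := records.filter
    (fun item => pvGetPT item == some "annual" || pvGetPT item == some "quarterly")
  match filtered with
  | [] => (none, none)
  | latest :: rest =>
      let target_period := pvGetPT latest
      match pvScanA target_period rest with
      | some previous => (some latest, some previous)
      | none => (some latest, none)

-- ===== PORT B =====
-- the keyed comprehension: (item.get("period_type"), item) for valid items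
def pvKeyOf? (item : List (String × String)) : Option (String × List (String × String)) :=
  match pvGetPT item with
  | some s => if s == "annual" || s == "quarterly" then some (s, item) else none
  | none => none

def latest_comparable_pair_py_alt (records : List (List (String × String))) : (Option (List (String × String))) × (Option (List (String × String))) :=
  let keyed := records.filterMap pvKeyOf?
  let groups := keyed.foldl (fun d p => d.modify p.1 [] (fun b => b ++ [p.2])) PySem.Dict.empty
  match keyed with
  | [] => (none, none)
  | (target, latest) :: _ =>
      -- groups[target]: the key is always present (target is keyed[0].1), getD only totalises
      let bucket := groups.getD target []
      if bucket.length ≥ 2 then (some latest, PySem.List.pyGet? bucket 1)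
      else (some latest, none)

-- ===== PRECONDITION & SPEC =====
def Spec_latest_comparable_pair_py (records : List (List (String × String))) (out : (Option (List (String × String))) × (Option (List (String × String)))) : Prop := out = latest_comparable_pair_py_alt records
instance (records : List (List (String × String))) (out : (Option (List (String × String))) × (Option (List (String × String)))) : Decidable (Spec_latest_comparable_pair_py records out) := by unfold Spec_latest_comparable_pair_py; infer_instance

-- ===== CLAIM (what is proved, stated in full; the proofs are below) =====
def Claim_equal_latest_comparable_pair_py : Prop := ∀ (records : List (List (String × String))), Dom_latest_comparable_pair_py records → Spec_latest_comparable_pair_py records (latest_comparable_pair_py records)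

-- ===== LEMMAS AND PROOFS =====

-- A's forward scan over the filtered tail finds exactly the head of B's bucket tail.
theorem pvScan_eq_bucket (s : String) (l : List (List (String × String))) :
    pvScanA (some s) (l.filter (fun item => pvGetPT item == some "annual" || pvGetPT item == some "quarterly"))
      = (((l.filterMap pvKeyOf?).filter (fun p => p.1 == s)).map (fun p => p.2)).head? := by
  induction l with
  | nil => rfl
  | cons x l ih =>
      simp only [List.filter_cons, List.filterMap_cons]
      rcases hx : pvGetPT x with _ | t
      · have hk : pvKeyOf? x = none := by simp [pvKeyOf?, hx]
        simpa [hk] using ih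
      · by_cases hv : (t == "annual" || t == "quarterly") = true
        · have hk : pvKeyOf? x = some (t, x) := by simp [pvKeyOf?, hx, hv]
          have hc : ((some t : Option String) == some "annual" || (some t : Option String) == some "quarterly") = true := by
            simpa using hv
          rw [if_pos hc]
          simp only [hk, List.filter_cons]
          by_cases hts : t = s
          · subst hts
            simp [pvScanA, hx]
          · have hf : ((t, x).1 == s) = false := by simpa using hts
            have hne : (pvGetPT x == some s) = false := by simp [hx, hts]
            simp only [hf, Bool.false_eq_true, if_false, pvScanA, hne]
            exact ih
        · have hk : pvKeyOf? x = none := by simp [pvKeyOf?, hx, hv]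
          have hc : ((some t : Option String) == some "annual" || (some t : Option String) == some "quarterly") = false := by
            simpa using hv
          simp only [hc, Bool.false_eq_true, if_false, hk]
          exact ih

theorem main_eq (records : List (List (String × String))) :
    latest_comparable_pair_py records = latest_comparable_pair_py_alt records := by
  induction records with
  | nil => rfl
  | cons r rest ih =>
      rcases hr : pvKeyOf? r with _ | ⟨s, r'⟩
      · -- r is invalid: dropped by both passes
        have hcr : (pvGetPT r == some "annual" || pvGetPT r == some "quarterly") = false := by
          unfold pvKeyOf? at hr
          rcases h : pvGetPT r with _ | t <;> rw [h] at hr <;> simp at hr ⊢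
          exact hr
        simp only [latest_comparable_pair_py, latest_comparable_pair_py_alt,
          List.filter_cons, List.filterMap_cons, hcr, hr, Bool.false_eq_true, if_false] at ih ⊢
        exact ih
      · -- r is valid with period_type s
        have hparse : pvGetPT r = some s ∧ r' = r ∧ (s == "annual" || s == "quarterly") = true := by
          unfold pvKeyOf? at hr
          rcases h : pvGetPT r with _ | t <;> rw [h] at hr <;> simp at hr
          obtain ⟨hts, rfl, rfl⟩ := hr
          exact ⟨rfl, rfl, by rcases hts with h' | h' <;> simp [h']⟩
        obtain ⟨hpt, rfl, hv⟩ := hparse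
        have hcr : (pvGetPT r' == some "annual" || pvGetPT r' == some "quarterly") = true := by
          rw [hpt]; simpa using hv
        simp only [latest_comparable_pair_py, latest_comparable_pair_py_alt,
          List.filter_cons, List.filterMap_cons, hcr, hr, if_pos]
        -- rewrite B's dict lookup into a list filter over the keyed list
        rw [PySem.Dict.getD_foldl_modify_append]
        simp only [PySem.Dict.getD_empty, List.nil_append, List.filter_cons]
        have hss : ((s, r').1 == s) = true := by simp
        rw [if_pos hss]
        simp only [List.map_cons]
        rw [hpt, pvScan_eq_bucket s rest]
        generalize (((rest.filterMap pvKeyOf?).filter (fun p => p.1 == s)).map (fun p => p.2)) = tb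
        rcases tb with _ | ⟨a, t⟩
        · simp
        · have h1 : PySem.List.pyGet? (r' :: a :: t) 1 = some a := by
            have h0 := PySem.List.pyGet?_cons_succ r' (a :: t) 0
            simpa [PySem.List.pyGet?_zero_cons] using h0
          have hlen : (r' :: a :: t).length ≥ 2 := by
            simp only [List.length_cons]; omega
          rw [if_pos hlen, h1]
          simp

-- ===== VERDICT (by name: the statement is the Claim_ definition above) =====
theorem latest_comparable_pair_py_spec : Claim_equal_latest_comparable_pair_py := by
  intro records _
  unfold Spec_latest_comparable_pair_py
  exact main_eq records
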